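-- pv_equiv track=rewrite | github.com/42triangles/plover-dictgen | count-similarities.py | rerender_chord
-- ===== SOURCE A (Python) =====
-- def rerender_chord(chord):
--     out = ""
--     had_hyphen = False
--     had_mid = False
--     for i in chord:
--         if i == "-":
--             out += i
--             had_hyphen = True
--         elif i in "*EU" and not had_hyphen:
--             out += "-" + i
--             had_hyphen = True
--         elif i not in "AO*EU" and had_mid and not had_hyphen:
--             out += "-" + i
--             had_hyphen = True
--         else:
--             out += i
--             if i in "AO":
--                 had_mid = True
--     return out
-- ===== SOURCE B (Python) =====
-- def rerender_chord(chord):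
--     had_mid = False
--     for j, c in enumerate(chord):
--         if c == "-":
--             return chord
--         if c in "*EU" or (had_mid and c not in "AO*EU"):
--             return chord[:j] + "-" + chord[j:]
--         if c in "AO":
--             had_mid = True
--     return chord
-- ===== Notes on version B (the rewrite author's own statement) =====
-- stated objective: simpler
-- what changed: Instead of rebuilding the string char by char with a had_hyphen flag, B scans once to find the single insertion index (or an explicit hyphen, which means no insertion) and returns the chord unchanged or one slice splice chord[:j] + hyphen + chord[j:].
import Mathlib
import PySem

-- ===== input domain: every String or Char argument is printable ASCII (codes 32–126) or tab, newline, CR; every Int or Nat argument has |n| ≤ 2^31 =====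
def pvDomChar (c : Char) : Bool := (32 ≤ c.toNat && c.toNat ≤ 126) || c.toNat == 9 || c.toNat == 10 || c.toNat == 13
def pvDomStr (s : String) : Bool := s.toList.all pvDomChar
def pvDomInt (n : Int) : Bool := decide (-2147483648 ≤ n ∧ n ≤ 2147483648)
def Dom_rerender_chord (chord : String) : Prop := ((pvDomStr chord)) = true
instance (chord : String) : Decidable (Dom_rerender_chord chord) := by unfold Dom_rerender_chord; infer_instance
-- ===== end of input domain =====

-- B replaces A's char-by-char accumulation (with a had_hyphen flag) by locating the
-- single insertion index and doing one slice splice; objective: simpler.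

-- ===== PORT A =====
-- A's loop over the chord's characters, state (out, had_hyphen, had_mid).
def rerenderGo : List Char → List Char → Bool → Bool → List Char
  | [], out, _, _ => out
  | c :: rest, out, hadHyphen, hadMid =>
    if c = '-' then
      rerenderGo rest (out ++ [c]) true hadMid
    else if (c = '*' ∨ c = 'E' ∨ c = 'U') ∧ ¬hadHyphen then
      rerenderGo rest (out ++ ['-', c]) true hadMid
    else if ¬(c = 'A' ∨ c = 'O' ∨ c = '*' ∨ c = 'E' ∨ c = 'U') ∧ hadMid ∧ ¬hadHyphen then
      rerenderGo rest (out ++ ['-', c]) true hadMid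
    else
      rerenderGo rest (out ++ [c]) hadHyphen (hadMid || (c = 'A' || c = 'O'))

def rerender_chord (chord : String) : String :=
  String.ofList (rerenderGo chord.toList [] false false)

-- ===== PORT B =====
-- B's scan: first index demanding a split (none = literal '-' seen first, or no such index).
def findSplit : List Char → Bool → Nat → Option Nat
  | [], _, _ => none
  | c :: rest, hadMid, j =>
    if c = '-' then none
    else if (c = '*' ∨ c = 'E' ∨ c = 'U') ∨ (hadMid ∧ ¬(c = 'A' ∨ c = 'O' ∨ c = '*' ∨ c = 'E' ∨ c = 'U')) then
      some j
    else findSplit rest (hadMid || (c = 'A' || c = 'O')) (j + 1)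

def rerender_chord_alt (chord : String) : String :=
  match findSplit chord.toList false 0 with
  | none => chord
  | some j => String.ofList (chord.toList.take j ++ '-' :: chord.toList.drop j)

-- ===== PRECONDITION & SPEC =====
def Spec_rerender_chord (chord : String) (out : String) : Prop := out = rerender_chord_alt chord
instance (chord : String) (out : String) : Decidable (Spec_rerender_chord chord out) := by unfold Spec_rerender_chord; infer_instance

-- ===== CLAIM (what is proved, stated in full; the proofs are below) =====
def Claim_equal_rerender_chord : Prop := ∀ (chord : String), Dom_rerender_chord chord → Spec_rerender_chord chord (rerender_chord chord)

-- ===== LEMMAS AND PROOFS =====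

-- Once a hyphen was emitted, A copies the rest verbatim.
theorem rerenderGo_true (cs : List Char) : ∀ (out : List Char) (hm : Bool),
    rerenderGo cs out true hm = out ++ cs := by
  induction cs with
  | nil => intro out hm; simp [rerenderGo]
  | cons c rest ih =>
    intro out hm
    simp only [rerenderGo]
    by_cases h : c = '-'
    · simp [h, ih]
    · simp [h, ih]

theorem findSplit_shift (cs : List Char) : ∀ (hm : Bool) (j : Nat),
    findSplit cs hm (j + 1) = (findSplit cs hm j).map Nat.succ := by
  induction cs with
  | nil => intro hm j; simp [findSplit]
  | cons c rest ih =>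
    intro hm j
    simp only [findSplit]
    split_ifs <;> simp [ih]

theorem rerenderGo_splice (cs : List Char) : ∀ (out : List Char) (hm : Bool),
    rerenderGo cs out false hm =
      out ++ (match findSplit cs hm 0 with
              | none => cs
              | some j => cs.take j ++ '-' :: cs.drop j) := by
  induction cs with
  | nil => intro out hm; simp [rerenderGo, findSplit]
  | cons c rest ih =>
    intro out hm
    by_cases h1 : c = '-'
    · simp [rerenderGo, findSplit, h1, rerenderGo_true]
    · by_cases h2 : c = '*' ∨ c = 'E' ∨ c = 'U'
      · simp [rerenderGo, findSplit, h1, h2, rerenderGo_true]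
      · by_cases h3 : hm ∧ ¬(c = 'A' ∨ c = 'O' ∨ c = '*' ∨ c = 'E' ∨ c = 'U')
        · obtain ⟨hhm, hnot⟩ := h3
          have hAO : ¬c = 'A' ∧ ¬c = 'O' := by tauto
          simp [rerenderGo, findSplit, h1, h2, hhm, hAO, rerenderGo_true]
        · have hcond : ¬((c = '*' ∨ c = 'E' ∨ c = 'U') ∨
              (hm ∧ ¬(c = 'A' ∨ c = 'O' ∨ c = '*' ∨ c = 'E' ∨ c = 'U'))) := by
            tauto
          have hA : ¬(¬(c = 'A' ∨ c = 'O' ∨ c = '*' ∨ c = 'E' ∨ c = 'U') ∧ hm = true ∧ ¬false = true) := by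
            tauto
          simp only [rerenderGo, findSplit, h1, h1, if_neg (by tauto : ¬((c = '*' ∨ c = 'E' ∨ c = 'U') ∧ ¬false = true)), if_neg hA, if_neg hcond]
          rw [ih, findSplit_shift]
          cases hfs : findSplit rest (hm || (c = 'A' || c = 'O')) 0 <;> simp

theorem rerender_chord_eq (chord : String) : rerender_chord chord = rerender_chord_alt chord := by
  unfold rerender_chord rerender_chord_alt
  rw [rerenderGo_splice]
  cases hfs : findSplit chord.toList false 0 <;> simp [String.ofList_toList]

-- ===== VERDICT (by name: the statement is the Claim_ definition above) =====
theorem rerender_chord_spec : Claim_equal_rerender_chord := by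
  intro chord _
  exact rerender_chord_eq chord
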